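-- pv_equiv track=rewrite | github.com/cguethle/coding-practice | ProjectEuler/utils.py | get_num_divisors
-- ===== SOURCE A (Python) =====
-- from collections import defaultdict
--
-- def get_num_divisors(prime_factors):
--     num_divisors = 1
--     prime_counts = defaultdict(int)
--     for f in prime_factors:
--         prime_counts[f] += 1
--     for c in prime_counts:
--         num_divisors *= prime_counts[c] + 1
--     return num_divisors
-- ===== SOURCE B (Python) =====
-- def get_num_divisors(prime_factors):
--     result = 1
--     prev = None
--     run = 0
--     for f in sorted(prime_factors):
--         if run > 0 and f == prev:
--             run += 1
--         else:
--             result *= run + 1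
--             prev = f
--             run = 1
--     return result * (run + 1)
-- ===== Notes on version B (the rewrite author's own statement) =====
-- stated objective: alternative
-- what changed: Replaces the defaultdict multiplicity count plus a second pass over the dict with a single sort-then-scan that tracks consecutive equal runs and multiplies (run length + 1) as each run closes.
import Mathlib
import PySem

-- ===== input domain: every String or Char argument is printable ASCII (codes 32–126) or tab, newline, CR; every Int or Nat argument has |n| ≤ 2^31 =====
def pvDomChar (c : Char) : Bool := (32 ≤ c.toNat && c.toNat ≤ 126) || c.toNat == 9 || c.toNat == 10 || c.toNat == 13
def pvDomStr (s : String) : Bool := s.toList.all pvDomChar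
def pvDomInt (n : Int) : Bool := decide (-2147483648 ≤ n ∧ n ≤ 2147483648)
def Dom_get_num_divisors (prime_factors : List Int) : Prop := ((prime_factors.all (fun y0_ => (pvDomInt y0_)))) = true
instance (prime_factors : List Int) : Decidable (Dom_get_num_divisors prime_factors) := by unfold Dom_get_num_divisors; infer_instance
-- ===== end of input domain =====

-- B replaces the dict-of-multiplicities with a sort-then-run-length scan (alternative decomposition, not faster).

-- ===== PORT A =====
def get_num_divisors (prime_factors : List Int) : Int :=
  let prime_counts : PySem.Dict Int Int :=
    prime_factors.foldl (fun d f => d.modify f 0 (· + 1)) PySem.Dict.empty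
  prime_counts.keys.foldl (fun num_divisors c => num_divisors * (prime_counts.getD c 0 + 1)) 1

-- ===== PORT B =====
-- one loop step of Source B: state (result, prev, run)
def pvBStep (st : Int × Option Int × Int) (f : Int) : Int × Option Int × Int :=
  if st.2.2 > 0 ∧ st.2.1 = some f then (st.1, st.2.1, st.2.2 + 1)
  else (st.1 * (st.2.2 + 1), some f, 1)

def get_num_divisors_alt (prime_factors : List Int) : Int :=
  let st := (PySem.List.sorted prime_factors (fun x => x) false).foldl pvBStep (1, none, 0)
  st.1 * (st.2.2 + 1)

-- ===== PRECONDITION & SPEC =====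
def Spec_get_num_divisors (prime_factors : List Int) (out : Int) : Prop := out = get_num_divisors_alt prime_factors
instance (prime_factors : List Int) (out : Int) : Decidable (Spec_get_num_divisors prime_factors out) := by unfold Spec_get_num_divisors; infer_instance

-- ===== CLAIM (what is proved, stated in full; the proofs are below) =====
def Claim_equal_get_num_divisors : Prop := ∀ (prime_factors : List Int), Dom_get_num_divisors prime_factors → Spec_get_num_divisors prime_factors (get_num_divisors prime_factors)

-- ===== LEMMAS AND PROOFS =====

-- canonical value: product over the distinct elements of (multiplicity + 1)
def pvP (l : List Int) : Int := ∏ x ∈ l.toFinset, ((l.count x : Int) + 1)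

theorem pvFoldl_mul (f : Int → Int) (l : List Int) (a : Int) :
    l.foldl (fun acc c => acc * f c) a = a * (l.map f).prod := by
  induction l generalizing a with
  | nil => simp
  | cons x t ih => simp [List.foldl_cons, ih, mul_assoc]

theorem pvCount_filter_ne (u : List Int) (x a : Int) (hx : x ≠ a) :
    (u.filter (fun y => y != a)).count x = u.count x := by
  induction u with
  | nil => rfl
  | cons b t ih =>
    by_cases hb : b = a
    · subst hb; simp [List.filter_cons, List.count_cons, ih, Ne.symm hx]
    · simp [List.filter_cons, List.count_cons, hb, ih]

theorem pvSplit (a : Int) (u : List Int) :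
    pvP (a :: u) = ((u.count a : Int) + 2) * pvP (u.filter (fun x => x != a)) := by
  unfold pvP
  have hset : (a :: u).toFinset = insert a ((u.filter (fun x => x != a)).toFinset) := by
    ext x
    by_cases hx : x = a <;> simp [hx, List.mem_filter]
  have hnot : a ∉ (u.filter (fun x => x != a)).toFinset := by
    simp [List.mem_filter]
  rw [hset, Finset.prod_insert hnot]
  have h1 : ((a :: u).count a : Int) + 1 = (u.count a : Int) + 2 := by
    simp [List.count_cons]; push_cast; ring
  rw [h1]
  congr 1
  apply Finset.prod_congr rfl
  intro x hx
  have hxa : x ≠ a := by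
    rcases List.mem_toFinset.mp hx with h
    simp [List.mem_filter] at h; exact h.2
  simp [List.count_cons, Ne.symm hxa, hxa, pvCount_filter_ne u x a hxa]

theorem pvLoop (s : List Int) : ∀ (r p c : Int), 1 ≤ c →
    s.Pairwise (· ≤ ·) → (∀ x ∈ s, p ≤ x) →
    (let st := s.foldl pvBStep (r, some p, c); st.1 * (st.2.2 + 1))
      = r * (c + (s.count p : Int) + 1) * pvP (s.filter (fun x => x != p)) := by
  induction s with
  | nil => intro r p c _ _ _; simp [pvP]
  | cons f t ih =>
    intro r p c hc hpw hge
    have hpwt := (List.pairwise_cons.mp hpw).2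
    have hft : ∀ x ∈ t, f ≤ x := (List.pairwise_cons.mp hpw).1
    by_cases hf : f = p
    · subst hf
      have hstep : pvBStep (r, some f, c) f = (r, some f, c + 1) := by
        simp [pvBStep]; omega
      simp only [List.foldl_cons, hstep]
      have hfl : (f :: t).filter (fun x => x != f) = t.filter (fun x => x != f) := by
        simp [List.filter_cons]
      rw [ih r f (c + 1) (by omega) hpwt hft, hfl, List.count_cons_self]
      push_cast; ring
    · have hplt : p < f := lt_of_le_of_ne (hge f (by simp)) (Ne.symm hf)
      have hstep : pvBStep (r, some p, c) f = (r * (c + 1), some f, 1) := by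
        simp [pvBStep, hf, Ne.symm hf]
      simp only [List.foldl_cons, hstep]
      have hrec := ih (r * (c + 1)) f 1 (by omega) hpwt hft
      -- p occurs nowhere in f :: t
      have hnp : ∀ x ∈ f :: t, x ≠ p := by
        intro x hx
        rcases List.mem_cons.mp hx with h | h
        · subst h; exact hf
        · exact fun he => absurd (hft x h) (by rw [he]; exact not_le_of_gt hplt)
      have hcount : (f :: t).count p = 0 := by
        rw [List.count_eq_zero]; intro h; exact hnp p h rfl
      have hfilter : (f :: t).filter (fun x => x != p) = f :: t := by
        apply List.filter_eq_self.mpr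
        intro x hx; simpa using hnp x hx
      rw [hrec, hfilter, hcount, pvSplit f t]
      push_cast; ring

theorem pvB_eq_P (s : List Int) (hpw : s.Pairwise (· ≤ ·)) :
    (let st := s.foldl pvBStep (1, none, 0); st.1 * (st.2.2 + 1)) = pvP s := by
  cases s with
  | nil => simp [pvP]
  | cons f t =>
    have hstep : pvBStep ((1 : Int), (none : Option Int), (0 : Int)) f = (1, some f, 1) := by
      simp [pvBStep]
    simp only [List.foldl_cons, hstep]
    have := pvLoop t 1 f 1 (by norm_num) (List.pairwise_cons.mp hpw).2 (List.pairwise_cons.mp hpw).1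
    rw [this, pvSplit f t]
    push_cast; ring

theorem pvCount_sorted (l : List Int) (x : Int) :
    (PySem.List.sorted l (fun x => x) false).count x = l.count x :=
  (PySem.List.sorted_perm l (fun x => x) false).count_eq x

theorem pvToFinset_sorted (l : List Int) :
    (PySem.List.sorted l (fun x => x) false).toFinset = l.toFinset := by
  ext x; simp [PySem.List.mem_sorted]

theorem pvB_val (l : List Int) : get_num_divisors_alt l = pvP l := by
  unfold get_num_divisors_alt
  rw [pvB_eq_P _ (PySem.List.sorted_pairwise l (fun x => x))]
  unfold pvP
  rw [pvToFinset_sorted]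
  exact Finset.prod_congr rfl (fun x _ => by rw [pvCount_sorted])

theorem pvA_val (l : List Int) : get_num_divisors l = pvP l := by
  unfold get_num_divisors
  have hctr : l.foldl (fun d f => d.modify f 0 (· + 1)) (PySem.Dict.empty : PySem.Dict Int Int)
      = PySem.Dict.counter l := (PySem.Dict.counter_eq_foldl l).symm
  rw [hctr]
  rw [pvFoldl_mul (fun c => (PySem.Dict.counter l).getD c 0 + 1)]
  have hkeys : (PySem.Dict.counter l).keys = PySem.Set.ofList l := PySem.Dict.keys_counter l
  rw [hkeys, one_mul]
  have hnd : (PySem.Set.ofList l).Nodup := PySem.Set.nodup_ofList l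
  rw [← List.prod_toFinset _ hnd]
  have hts : (PySem.Set.ofList l).toFinset = l.toFinset := by
    ext x; simp [PySem.Set.mem_ofList]
  rw [hts]
  unfold pvP
  exact Finset.prod_congr rfl (fun x _ => by rw [PySem.Dict.getD_counter])

-- ===== VERDICT (by name: the statement is the Claim_ definition above) =====
theorem get_num_divisors_spec : Claim_equal_get_num_divisors := by
  intro l _
  unfold Spec_get_num_divisors
  rw [pvA_val, pvB_val]
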